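-- pv_equiv track=rewrite | github.com/Debadrita20/Network_LabAssignments | Assignment3/errordetect.py | lrc
-- ===== SOURCE A (Python) =====
-- def lrc(data,parity='odd'):   # returns codeword according to LRC
--     codeword=data
--     n=[0,0,0,0]
--     i=0
--     for ch in data:
--         if ch=='1':
--             n[i%4]=n[i%4]+1
--         i=i+1
--     if parity=='odd':
--         for x in n:
--             if x%2==0:
--                 codeword=codeword+'1'
--             else:
--                 codeword=codeword+'0'
--     else:
--         for x in n:
--             if x%2==0:
--                 codeword=codeword+'0'
--             else:
--                 codeword=codeword+'1'
--     return codeword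
-- ===== SOURCE B (Python) =====
-- def lrc(data, parity='odd'):
--     even_bit, odd_bit = ('1', '0') if parity == 'odd' else ('0', '1')
--     bits = ''.join(
--         even_bit if data[j::4].count('1') % 2 == 0 else odd_bit
--         for j in range(4))
--     return data + bits
-- ===== Notes on version B (the rewrite author's own statement) =====
-- stated objective: simpler
-- what changed: Replaces the manual indexed pass that maintains four mutable counters (and a second bit-appending pass) with four column slices data[j::4] whose counts of the set bit directly give the parity bits joined onto data.
import Mathlib
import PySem

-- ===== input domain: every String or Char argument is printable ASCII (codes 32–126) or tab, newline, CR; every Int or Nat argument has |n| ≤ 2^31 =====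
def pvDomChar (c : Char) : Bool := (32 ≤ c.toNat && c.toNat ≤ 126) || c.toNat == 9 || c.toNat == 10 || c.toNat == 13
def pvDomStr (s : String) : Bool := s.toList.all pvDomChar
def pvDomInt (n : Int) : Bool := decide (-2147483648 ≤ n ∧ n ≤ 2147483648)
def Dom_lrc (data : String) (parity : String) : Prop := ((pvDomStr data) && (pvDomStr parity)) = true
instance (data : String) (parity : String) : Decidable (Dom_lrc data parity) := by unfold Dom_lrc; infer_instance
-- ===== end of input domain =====

-- B replaces A's indexed single pass over data with four mutable counters (plus a second
-- bit-appending pass) by four column slices data[j::4] whose ones-counts give the parity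
-- bits directly; objective: simpler. Equivalence is proved on all inputs (A is total).

-- ===== PORT A =====
-- one step of A's first loop: state = (the list n, the running index i);
-- Python's i stays ≥ 0 throughout, so it is carried as a Nat and i % 4 is Nat mod (identical there)
def lrcStep (st : List Int × Nat) (ch : Char) : List Int × Nat :=
  let n := if ch = '1' then st.1.set (st.2 % 4) (st.1.getD (st.2 % 4) 0 + 1) else st.1
  (n, st.2 + 1)

def lrc (data : String) (parity : String) : String :=
  let codeword := data.toList
  let n := (data.toList.foldl lrcStep ([0, 0, 0, 0], 0)).1
  let codeword :=
    if parity = "odd" then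
      n.foldl (fun cw x => if PySem.Int.mod x 2 = 0 then cw ++ ['1'] else cw ++ ['0']) codeword
    else
      n.foldl (fun cw x => if PySem.Int.mod x 2 = 0 then cw ++ ['0'] else cw ++ ['1']) codeword
  String.ofList codeword

-- ===== PORT B =====
def lrc_alt (data : String) (parity : String) : String :=
  let bits := if parity = "odd" then ('1', '0') else ('0', '1')
  let tail := (PySem.List.pyRange 0 4 1).map (fun j =>
    if ((PySem.List.slice? data.toList (some j) none 4).getD []).count '1' % 2 = 0
    then bits.1 else bits.2)
  String.ofList (data.toList ++ tail)

-- ===== PRECONDITION & SPEC =====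
def Spec_lrc (data : String) (parity : String) (out : String) : Prop := out = lrc_alt data parity
instance (data : String) (parity : String) (out : String) : Decidable (Spec_lrc data parity out) := by unfold Spec_lrc; infer_instance

-- ===== CLAIM (what is proved, stated in full; the proofs are below) =====
def Claim_equal_lrc : Prop := ∀ (data : String) (parity : String), Dom_lrc data parity → Spec_lrc data parity (lrc data parity)

-- ===== LEMMAS AND PROOFS =====

-- count of '1' in the column data[j::4]
def cnt (j : Nat) (xs : List Char) : Nat :=
  ((PySem.List.slice? xs (some (j : Int)) none 4).getD []).count '1'

lemma slice4_nil (j : Nat) :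
    PySem.List.slice? ([] : List Char) (some (j : Int)) none 4 = some [] := by
  simp [PySem.List.slice?, PySem.List.sliceIndices]

lemma slice4_cons_succ (x : Char) (xs : List Char) (j : Nat) :
    PySem.List.slice? (x :: xs) (some ((j : Int) + 1)) none 4
      = PySem.List.slice? xs (some (j : Int)) none 4 := by
  simp only [PySem.List.slice?, PySem.List.sliceIndices]
  norm_num
  have h1 : ¬ ((j : Int) + 1 < 0) := by omega
  have h2 : ¬ ((j : Int) < 0) := by omega
  simp only [if_neg h1, if_neg h2]
  set L : Int := (xs.length : Int) with hL
  set m : Int := min (j : Int) L with hm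
  have hcount : (if m + 1 ≤ L then ((L + 1 - (m + 1) + 4 - 1) / 4).toNat else 0)
      = (if m < L then ((L - m + 4 - 1) / 4).toNat else 0) := by
    split_ifs with hA hB <;> omega
  rw [hcount]
  apply List.filterMap_congr
  intro k _
  have hk : (m + 1 + 4 * (k : Int)).toNat = (m + 4 * (k : Int)).toNat + 1 := by omega
  rw [hk, List.getElem?_cons_succ]

lemma slice4_cons_zero (x : Char) (xs : List Char) :
    PySem.List.slice? (x :: xs) (some 0) none 4
      = some (x :: (PySem.List.slice? xs (some 3) none 4).getD [])  := by
  simp only [PySem.List.slice?, PySem.List.sliceIndices]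
  norm_num
  have hcnt : (((xs.length : Int) + 1 - min 0 ((xs.length : Int) + 1) + 4 - 1) / 4).toNat
      = xs.length / 4 + 1 := by omega
  rw [hcnt, List.range_succ_eq_map]
  have hcnt2 : (if 3 < xs.length then (((xs.length : Int) - min 3 (xs.length : Int) + 4 - 1) / 4).toNat else 0)
      = xs.length / 4 := by split_ifs <;> omega
  rw [hcnt2]
  simp only [List.filterMap_cons]
  have h0 : (min 0 ((xs.length : Int) + 1) + 4 * ((0 : Nat) : Int)).toNat = 0 := by omega
  rw [h0]
  simp only [List.getElem?_cons_zero, List.filterMap_map]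
  refine congrArg _ (List.filterMap_congr ?_)
  intro k hk
  simp only [List.mem_range] at hk
  have h4 : 4 ≤ xs.length := by omega
  have hidx : (min 0 ((xs.length : Int) + 1) + 4 * ((k + 1 : Nat) : Int)).toNat
      = (min 3 (xs.length : Int) + 4 * (k : Int)).toNat + 1 := by omega
  simp only [Function.comp, hidx, List.getElem?_cons_succ]

lemma cnt_nil (j : Nat) : cnt j [] = 0 := by
  simp [cnt, slice4_nil]

lemma cnt_cons_succ (x : Char) (xs : List Char) (j : Nat) :
    cnt (j + 1) (x :: xs) = cnt j xs := by
  have h := slice4_cons_succ x xs j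
  simp only [cnt, Nat.cast_add, Nat.cast_one, h]

lemma cnt0 (x : Char) (xs : List Char) :
    cnt 0 (x :: xs) = cnt 3 xs + (if x = '1' then 1 else 0) := by
  simp only [cnt, Nat.cast_zero, Nat.cast_ofNat, slice4_cons_zero, Option.getD_some,
    List.count_cons]
  simp [beq_iff_eq]

lemma cnt1 (x : Char) (xs : List Char) : cnt 1 (x :: xs) = cnt 0 xs := by
  simpa using cnt_cons_succ x xs 0

lemma cnt2 (x : Char) (xs : List Char) : cnt 2 (x :: xs) = cnt 1 xs := by
  simpa using cnt_cons_succ x xs 1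

lemma cnt3 (x : Char) (xs : List Char) : cnt 3 (x :: xs) = cnt 2 xs := by
  simpa using cnt_cons_succ x xs 2

lemma foldA (xs : List Char) : ∀ (a b c d : Int) (i : Nat),
    (xs.foldl lrcStep ([a, b, c, d], i)).1 =
      [a + cnt ((4 - i % 4) % 4) xs, b + cnt ((5 - i % 4) % 4) xs,
       c + cnt ((6 - i % 4) % 4) xs, d + cnt ((7 - i % 4) % 4) xs] := by
  induction xs with
  | nil => intro a b c d i; simp [cnt_nil]
  | cons x xs ih =>
    intro a b c d i
    have hr : i % 4 = 0 ∨ i % 4 = 1 ∨ i % 4 = 2 ∨ i % 4 = 3 := by omega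
    rcases hr with hr | hr | hr | hr
    · have h1 : (i + 1) % 4 = 1 := by omega
      simp only [List.foldl_cons, lrcStep, hr]
      by_cases hx : x = '1' <;>
        simp [hx, List.set, ih, h1, cnt0, cnt1, cnt2, cnt3] <;> push_cast <;> ring
    · have h1 : (i + 1) % 4 = 2 := by omega
      simp only [List.foldl_cons, lrcStep, hr]
      by_cases hx : x = '1' <;>
        simp [hx, List.set, ih, h1, cnt0, cnt1, cnt2, cnt3] <;> push_cast <;> ring
    · have h1 : (i + 1) % 4 = 3 := by omega
      simp only [List.foldl_cons, lrcStep, hr]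
      by_cases hx : x = '1' <;>
        simp [hx, List.set, ih, h1, cnt0, cnt1, cnt2, cnt3] <;> push_cast <;> ring
    · have h1 : (i + 1) % 4 = 0 := by omega
      simp only [List.foldl_cons, lrcStep, hr]
      by_cases hx : x = '1' <;>
        simp [hx, List.set, ih, h1, cnt0, cnt1, cnt2, cnt3] <;> push_cast <;> ring

-- ===== VERDICT (by name: the statement is the Claim_ definition above) =====
theorem lrc_spec : Claim_equal_lrc := by
  intro data parity _
  show lrc data parity = lrc_alt data parity
  have hmod : ∀ c : Nat, (PySem.Int.mod (c : Int) 2 = 0) ↔ (c % 2 = 0) := by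
    intro c
    rw [PySem.Int.mod, Int.fmod_eq_emod]
    simp
    omega
  have hrange : PySem.List.pyRange 0 4 1 = [0, 1, 2, 3] := by decide
  have hn := foldA data.toList 0 0 0 0 0
  simp only [Nat.zero_mod, Nat.sub_zero] at hn
  norm_num at hn
  simp only [lrc, lrc_alt, hn, hrange, List.map, List.foldl, hmod]
  by_cases hp : parity = "odd" <;>
    simp [hp, cnt] <;> split_ifs <;> simp
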